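-- pv_equiv track=rewrite | github.com/hyo-jae-jung/beakjoon | solved/1972.py | solution
-- ===== SOURCE A (Python) =====
-- def solution(S):
--     l = len(S)
--     for i in range(1,l):
--         s = set()
--         for j in range(i,l):
--             if S[j]+S[j-i] in s:
--                 return f"{S} is NOT surprising."
--             s.add(S[j]+S[j-i])
--
--     return f"{S} is surprising."
-- ===== SOURCE B (Python) =====
-- def solution(S):
--     l = len(S)
--     for i in range(1, l):
--         P = sorted(S[j] + S[j - i] for j in range(i, l))
--         for k in range(1, len(P)):
--             if P[k] == P[k - 1]:
--                 return f"{S} is NOT surprising."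
--     return f"{S} is surprising."
-- ===== Notes on version B (the rewrite author's own statement) =====
-- stated objective: alternative
-- what changed: Per-distance duplicate detection via incremental hash-set membership is replaced by collecting all distance-i digram strings into a list, sorting it, and scanning adjacent elements for an equal pair.
import Mathlib
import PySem

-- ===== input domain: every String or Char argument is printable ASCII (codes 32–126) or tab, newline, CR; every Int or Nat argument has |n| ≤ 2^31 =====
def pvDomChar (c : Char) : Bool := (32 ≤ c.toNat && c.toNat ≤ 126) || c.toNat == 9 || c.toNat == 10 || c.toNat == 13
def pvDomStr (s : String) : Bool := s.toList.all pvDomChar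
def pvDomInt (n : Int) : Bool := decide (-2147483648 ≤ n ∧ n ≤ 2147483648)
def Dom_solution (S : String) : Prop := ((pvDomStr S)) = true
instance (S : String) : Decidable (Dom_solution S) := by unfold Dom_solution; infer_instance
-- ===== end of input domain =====

-- B replaces A's per-distance incremental hash-set duplicate check by collecting all distance-i
-- digrams, sorting them, and scanning adjacent elements (objective: alternative, same result).

-- ===== PORT A =====
-- The 2-character Python string S[j]+S[j-i] is modelled as the pair of its characters
-- (exact: each slice is one character, so string equality = pair equality);
-- indices j and j-i are always in range, so pyGetD's default is never used.
def solution (S : String) : String :=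
  let cs := S.toList
  let l : Int := cs.length
  if (PySem.List.pyRange 1 l 1).any (fun i =>
      ((PySem.List.pyRange i l 1).foldl
        (fun (st : PySem.Set (Char × Char) × Bool) j =>
          if st.2 then st  -- models "return": once found, the loop's effect no longer matters
          else
            let p := (PySem.List.pyGetD cs j ' ', PySem.List.pyGetD cs (j - i) ' ')
            if PySem.Set.contains st.1 p then (st.1, true)
            else (PySem.Set.add st.1 p, false))
        ((PySem.Set.empty : PySem.Set (Char × Char)), false)).2)
  then S ++ " is NOT surprising."
  else S ++ " is surprising."

-- ===== PORT B =====
-- Source B sorts the list of 2-character strings S[j]+S[j-i]; Python compares such strings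
-- lexicographically by code point, which on the char pairs is exactly sorted2 with the
-- keys (ord of first char, ord of second char).
def solution_alt (S : String) : String :=
  let cs := S.toList
  let l : Int := cs.length
  if (PySem.List.pyRange 1 l 1).any (fun i =>
      let P := PySem.List.sorted2
          ((PySem.List.pyRange i l 1).map (fun j =>
            (PySem.List.pyGetD cs j ' ', PySem.List.pyGetD cs (j - i) ' ')))
          (fun p => (p.1.toNat : Int)) (fun p => (p.2.toNat : Int)) false
      (PySem.List.pyRange 1 (P.length : Int) 1).any (fun k =>
        PySem.List.pyGetD P k (' ', ' ') == PySem.List.pyGetD P (k - 1) (' ', ' ')))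
  then S ++ " is NOT surprising."
  else S ++ " is surprising."

-- ===== PRECONDITION & SPEC =====
def Spec_solution (S : String) (out : String) : Prop := out = solution_alt S
instance (S : String) (out : String) : Decidable (Spec_solution S out) := by unfold Spec_solution; infer_instance

-- ===== CLAIM (what is proved, stated in full; the proofs are below) =====
def Claim_equal_solution : Prop := ∀ (S : String), Dom_solution S → Spec_solution S (solution S)

-- ===== LEMMAS AND PROOFS =====

-- A's inner-loop step on the already-computed pair.
def stepA (st : PySem.Set (Char × Char) × Bool) (p : Char × Char) : PySem.Set (Char × Char) × Bool :=
  if st.2 then st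
  else if PySem.Set.contains st.1 p then (st.1, true)
  else (PySem.Set.add st.1 p, false)

-- encoding of a char pair that orders pairs exactly like Python orders the 2-char strings
def kEnc (p : Char × Char) : Int := (p.1.toNat : Int) * 1114112 + (p.2.toNat : Int)

lemma char_toNat_lt (c : Char) : c.toNat < 1114112 := by
  have h := c.valid
  unfold Char.toNat
  rcases h with h | ⟨h1, h2⟩ <;> omega

lemma kEnc_inj : Function.Injective kEnc := by
  intro a b h
  have ha1 := char_toNat_lt a.1; have ha2 := char_toNat_lt a.2
  have hb1 := char_toNat_lt b.1; have hb2 := char_toNat_lt b.2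
  unfold kEnc at h
  have h1 : a.1.toNat = b.1.toNat := by omega
  have h2 : a.2.toNat = b.2.toNat := by omega
  have e1 : a.1 = b.1 := Char.ext (by unfold Char.toNat at h1; exact UInt32.toNat_inj.mp h1)
  have e2 : a.2 = b.2 := Char.ext (by unfold Char.toNat at h2; exact UInt32.toNat_inj.mp h2)
  exact Prod.ext e1 e2

lemma stepA_true (ps : List (Char × Char)) (s : PySem.Set (Char × Char)) :
    ps.foldl stepA (s, true) = (s, true) := by
  induction ps generalizing s with
  | nil => rfl
  | cons p ps ih => simpa [stepA] using ih s

lemma stepA_found (ps : List (Char × Char)) (s : PySem.Set (Char × Char)) :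
    (ps.foldl stepA (s, false)).2 = true ↔ ¬ ps.Nodup ∨ ∃ p ∈ ps, p ∈ s := by
  induction ps generalizing s with
  | nil => simp
  | cons p ps ih =>
    by_cases hp : p ∈ s
    · have hc : PySem.Set.contains s p = true := (PySem.Set.contains_iff s p).mpr hp
      rw [List.foldl_cons]
      have hstep : stepA (s, false) p = (s, true) := by simp [stepA, hp]
      rw [hstep, stepA_true]
      constructor
      · intro _; right; exact ⟨p, List.mem_cons_self, hp⟩
      · intro _; rfl
    · have hc : PySem.Set.contains s p = false := by
        rcases h : PySem.Set.contains s p with _ | _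
        · rfl
        · exact absurd ((PySem.Set.contains_iff s p).mp h) hp
      simp only [List.foldl_cons, stepA, hc, if_false, Bool.false_eq_true]
      rw [ih]
      simp only [List.nodup_cons, List.mem_cons, PySem.Set.mem_add]
      constructor
      · rintro (hnd | ⟨q, hq, hqs | rfl⟩)
        · by_cases hpin : p ∈ ps
          · exact Or.inl (by tauto)
          · exact Or.inl (by tauto)
        · exact Or.inr ⟨q, Or.inr hq, hqs⟩
        · exact Or.inl (by tauto)
      · rintro (hnd | ⟨q, rfl | hq, hqs⟩)
        · by_cases hpin : p ∈ ps
          · exact Or.inr ⟨p, hpin, Or.inr rfl⟩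
          · exact Or.inl (by tauto)
        · exact absurd hqs hp
        · exact Or.inr ⟨q, hq, Or.inl hqs⟩

-- sorted2 with the two ord keys is sorting by the single key kEnc
lemma sorted2_eq_sorted_kEnc (xs : List (Char × Char)) :
    PySem.List.sorted2 xs (fun p => (p.1.toNat : Int)) (fun p => (p.2.toNat : Int)) false
      = PySem.List.sorted xs kEnc false := by
  have hb : (fun (a b : Char × Char) =>
      decide ((a.1.toNat : Int) < (b.1.toNat : Int)) ||
        (!decide ((b.1.toNat : Int) < (a.1.toNat : Int)) && decide ((a.2.toNat : Int) < (b.2.toNat : Int))))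
      = (fun a b => decide (kEnc a < kEnc b)) := by
    funext a b
    have ha2 := char_toNat_lt a.2
    have hb2 := char_toNat_lt b.2
    rw [Bool.eq_iff_iff]
    simp only [Bool.or_eq_true, Bool.and_eq_true, Bool.not_eq_eq_eq_not, Bool.not_true,
      decide_eq_false_iff_not, decide_eq_true_eq, kEnc, not_lt]
    omega
  simp only [PySem.List.sorted2, PySem.List.sorted, if_neg (by decide : ¬ (false = true)), hb]

-- in a key-sorted list, having a duplicate is having two EQUAL ADJACENT elements
lemma nodup_iff_no_adj (Q : List (Char × Char))
    (hp : Q.Pairwise (fun a b => kEnc a ≤ kEnc b)) :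
    (¬ Q.Nodup) ↔ ∃ n : Nat, ∃ h : n + 1 < Q.length, Q[n]'(Nat.lt_of_succ_lt h) = Q[n+1]'h := by
  induction Q with
  | nil => simp
  | cons a Q ih =>
    rw [List.pairwise_cons] at hp
    obtain ⟨ha, hQ⟩ := hp
    cases Q with
    | nil =>
      constructor
      · intro h; exact absurd (List.nodup_cons.mpr ⟨by simp, List.nodup_nil⟩) h
      · rintro ⟨n, h, _⟩; simp at h
    | cons b Q' =>
      by_cases hab : a = b
      · subst hab
        constructor
        · intro _
          exact ⟨0, by simp, rfl⟩
        · intro _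
          simp [List.nodup_cons]
      · have hanotin : a ∉ b :: Q' := by
          intro hmem
          rcases List.mem_cons.mp hmem with rfl | hmem'
          · exact hab rfl
          · have h1 : kEnc a ≤ kEnc b := ha b List.mem_cons_self
            have h2 : kEnc b ≤ kEnc a := (List.pairwise_cons.mp hQ).1 a hmem'
            exact hab (kEnc_inj (le_antisymm h1 h2))
        have hL : ¬ (a :: b :: Q').Nodup ↔ ¬ (b :: Q').Nodup := by
          simp [List.nodup_cons, hanotin]
        rw [hL, ih hQ]
        constructor
        · rintro ⟨n, h, heq⟩
          exact ⟨n + 1, by simpa using Nat.succ_lt_succ h, by simpa using heq⟩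
        · rintro ⟨n, h, heq⟩
          cases n with
          | zero => exact absurd heq hab
          | succ m =>
            refine ⟨m, by simpa using Nat.lt_of_succ_lt_succ h, ?_⟩
            simpa using heq

-- the adjacent-equal scan of the sorted list detects exactly "ps has a duplicate"
lemma adjacency_any (ps : List (Char × Char)) :
    ((PySem.List.pyRange 1 ((PySem.List.sorted ps kEnc false).length : Int) 1).any (fun k =>
        PySem.List.pyGetD (PySem.List.sorted ps kEnc false) k (' ', ' ') ==
        PySem.List.pyGetD (PySem.List.sorted ps kEnc false) (k - 1) (' ', ' ')) = true)
    ↔ ¬ ps.Nodup := by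
  have hperm := PySem.List.sorted_perm ps kEnc false
  rw [← List.Perm.nodup_iff hperm]
  rw [nodup_iff_no_adj _ (PySem.List.sorted_pairwise ps kEnc)]
  rw [List.any_eq_true]
  constructor
  · rintro ⟨k, hk, heq⟩
    rw [PySem.List.mem_pyRange_one] at hk
    obtain ⟨h1, h2⟩ := hk
    rw [PySem.List.pyGetD_eq_getElem _ _ (by omega) h2,
        PySem.List.pyGetD_eq_getElem _ _ (by omega) (by omega), beq_iff_eq] at heq
    refine ⟨(k - 1).toNat, by omega, ?_⟩
    have hidx : (k - 1).toNat + 1 = k.toNat := by omega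
    simp only [hidx]
    exact heq.symm
  · rintro ⟨n, h, heq⟩
    refine ⟨(n : Int) + 1, ?_, ?_⟩
    · rw [PySem.List.mem_pyRange_one]
      constructor
      · omega
      · omega
    · rw [PySem.List.pyGetD_eq_getElem _ _ (by omega) (by omega),
          PySem.List.pyGetD_eq_getElem _ _ (by omega) (by omega), beq_iff_eq]
      have e1 : ((n : Int) + 1).toNat = n + 1 := by omega
      have e2 : ((n : Int) + 1 - 1).toNat = n := by omega
      simp only [e1, e2]
      exact heq.symm

-- the per-distance bodies of the two ports compute the same Bool
lemma inner_eq (cs : List Char) (l i : Int) :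
    ((PySem.List.pyRange i l 1).foldl
        (fun (st : PySem.Set (Char × Char) × Bool) j =>
          if st.2 then st
          else
            let p := (PySem.List.pyGetD cs j ' ', PySem.List.pyGetD cs (j - i) ' ')
            if PySem.Set.contains st.1 p then (st.1, true)
            else (PySem.Set.add st.1 p, false))
        ((PySem.Set.empty : PySem.Set (Char × Char)), false)).2
    = (let P := PySem.List.sorted2
          ((PySem.List.pyRange i l 1).map (fun j =>
            (PySem.List.pyGetD cs j ' ', PySem.List.pyGetD cs (j - i) ' ')))
          (fun p => (p.1.toNat : Int)) (fun p => (p.2.toNat : Int)) false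
       (PySem.List.pyRange 1 (P.length : Int) 1).any (fun k =>
          PySem.List.pyGetD P k (' ', ' ') == PySem.List.pyGetD P (k - 1) (' ', ' '))) := by
  have hfold :
      ((PySem.List.pyRange i l 1).foldl
        (fun (st : PySem.Set (Char × Char) × Bool) j =>
          if st.2 then st
          else
            let p := (PySem.List.pyGetD cs j ' ', PySem.List.pyGetD cs (j - i) ' ')
            if PySem.Set.contains st.1 p then (st.1, true)
            else (PySem.Set.add st.1 p, false))
        ((PySem.Set.empty : PySem.Set (Char × Char)), false))
      = (((PySem.List.pyRange i l 1).map (fun j =>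
            (PySem.List.pyGetD cs j ' ', PySem.List.pyGetD cs (j - i) ' '))).foldl stepA
          ((PySem.Set.empty : PySem.Set (Char × Char)), false)) := by
    rw [List.foldl_map]
    rfl
  rw [Bool.eq_iff_iff, hfold, stepA_found]
  simp only [PySem.Set.empty, List.not_mem_nil, and_false, exists_false, or_false]
  rw [sorted2_eq_sorted_kEnc, adjacency_any]

-- ===== VERDICT (by name: the statement is the Claim_ definition above) =====
theorem solution_spec : Claim_equal_solution := by
  intro S _
  have h : ((PySem.List.pyRange 1 ((S.toList.length : Nat) : Int) 1).any (fun i =>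
        ((PySem.List.pyRange i ((S.toList.length : Nat) : Int) 1).foldl
          (fun (st : PySem.Set (Char × Char) × Bool) j =>
            if st.2 then st
            else
              let p := (PySem.List.pyGetD S.toList j ' ', PySem.List.pyGetD S.toList (j - i) ' ')
              if PySem.Set.contains st.1 p then (st.1, true)
              else (PySem.Set.add st.1 p, false))
          ((PySem.Set.empty : PySem.Set (Char × Char)), false)).2))
      = ((PySem.List.pyRange 1 ((S.toList.length : Nat) : Int) 1).any (fun i =>
        let P := PySem.List.sorted2
            ((PySem.List.pyRange i ((S.toList.length : Nat) : Int) 1).map (fun j =>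
              (PySem.List.pyGetD S.toList j ' ', PySem.List.pyGetD S.toList (j - i) ' ')))
            (fun p => (p.1.toNat : Int)) (fun p => (p.2.toNat : Int)) false
        (PySem.List.pyRange 1 (P.length : Int) 1).any (fun k =>
          PySem.List.pyGetD P k (' ', ' ') == PySem.List.pyGetD P (k - 1) (' ', ' ')))) :=
    List.any_congr rfl (fun i => inner_eq S.toList ((S.toList.length : Nat) : Int) i)
  show (if ((PySem.List.pyRange 1 ((S.toList.length : Nat) : Int) 1).any (fun i =>
        ((PySem.List.pyRange i ((S.toList.length : Nat) : Int) 1).foldl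
          (fun (st : PySem.Set (Char × Char) × Bool) j =>
            if st.2 then st
            else
              let p := (PySem.List.pyGetD S.toList j ' ', PySem.List.pyGetD S.toList (j - i) ' ')
              if PySem.Set.contains st.1 p then (st.1, true)
              else (PySem.Set.add st.1 p, false))
          ((PySem.Set.empty : PySem.Set (Char × Char)), false)).2))
      then S ++ " is NOT surprising." else S ++ " is surprising.")
    = (if ((PySem.List.pyRange 1 ((S.toList.length : Nat) : Int) 1).any (fun i =>
        let P := PySem.List.sorted2
            ((PySem.List.pyRange i ((S.toList.length : Nat) : Int) 1).map (fun j =>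
              (PySem.List.pyGetD S.toList j ' ', PySem.List.pyGetD S.toList (j - i) ' ')))
            (fun p => (p.1.toNat : Int)) (fun p => (p.2.toNat : Int)) false
        (PySem.List.pyRange 1 (P.length : Int) 1).any (fun k =>
          PySem.List.pyGetD P k (' ', ' ') == PySem.List.pyGetD P (k - 1) (' ', ' '))))
      then S ++ " is NOT surprising." else S ++ " is surprising.")
  rw [h]
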